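-- pv_equiv track=rewrite | github.com/dragons6641/programmers | problem/방금그곡.py | replaceSharp
-- ===== SOURCE A (Python) =====
-- def replaceSharp(orgMusicSoundStr) -> str:
--     orgMusicSoundIdx = 0;
--     newMusicSoundStr = '';
--
--     while (orgMusicSoundIdx < len(orgMusicSoundStr)):
--         if (orgMusicSoundIdx == len(orgMusicSoundStr) - 1) or (orgMusicSoundStr[orgMusicSoundIdx + 1] != '#'):
--             newMusicSoundStr += orgMusicSoundStr[orgMusicSoundIdx];
--             orgMusicSoundIdx += 1;
--         else:
--             newMusicSoundStr += orgMusicSoundStr[orgMusicSoundIdx].lower();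
--             orgMusicSoundIdx += 2;
--
--     return newMusicSoundStr;
-- ===== SOURCE B (Python) =====
-- def replaceSharp(orgMusicSoundStr) -> str:
--     out = []
--     armed = False  # True iff the last appended char may still pair with a following '#'
--     for c in orgMusicSoundStr:
--         if c == '#' and armed:
--             out[-1] = out[-1].lower()
--             armed = False
--         else:
--             out.append(c)
--             armed = True
--     return ''.join(out)
-- ===== Notes on version B (the rewrite author's own statement) =====
-- stated objective: faster
-- what changed: Replaces the index-based while-loop with lookahead and skip-by-1/2 that grows the result by repeated string concatenation with a single forward fold that pairs each sharp sign with the previously emitted, still-unpaired character, lowering it in place in a list joined once at the end.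
import Mathlib
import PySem

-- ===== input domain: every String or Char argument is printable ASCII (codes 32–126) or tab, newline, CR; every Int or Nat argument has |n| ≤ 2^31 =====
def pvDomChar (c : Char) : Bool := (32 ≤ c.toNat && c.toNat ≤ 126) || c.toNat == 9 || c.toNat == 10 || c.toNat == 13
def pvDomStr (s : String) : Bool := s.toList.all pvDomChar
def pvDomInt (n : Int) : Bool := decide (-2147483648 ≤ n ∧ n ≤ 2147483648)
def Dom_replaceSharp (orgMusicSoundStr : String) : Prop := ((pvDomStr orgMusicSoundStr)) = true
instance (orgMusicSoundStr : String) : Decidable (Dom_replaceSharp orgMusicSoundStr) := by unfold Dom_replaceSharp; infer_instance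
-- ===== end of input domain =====

-- B replaces A's index-based lookahead while-loop (which grows the result by string concatenation)
-- by a single forward fold that pairs each sharp sign with the previously emitted (still "armed")
-- character, collecting into a list joined once; measured faster at large sizes.

-- ===== PORT A =====
-- A's while-loop: index, lookahead at idx+1, emit-and-skip-1 or lower-emit-and-skip-2.
def replaceSharpLoopA (cs : List Char) (i : Nat) (acc : String) : String :=
  if _h : i < cs.length then
    if i == cs.length - 1 || cs.getD (i+1) ' ' != '#' then
      replaceSharpLoopA cs (i+1) (acc.push (cs.getD i ' '))
    else
      replaceSharpLoopA cs (i+2) (acc.push (PySem.Chars.lowerChar (cs.getD i ' ')))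
  else acc
termination_by cs.length - i

def replaceSharp (orgMusicSoundStr : String) : String :=
  replaceSharpLoopA orgMusicSoundStr.toList 0 ""

-- ===== PORT B =====
-- B's fold state: (emitted chars in reverse, armed flag).
def replaceSharpStepB (st : List Char × Bool) (c : Char) : List Char × Bool :=
  if c == '#' && st.2 then
    match st.1 with
    | h :: t => (PySem.Chars.lowerChar h :: t, false)
    | [] => ([], false)   -- unreachable: armed is only set after an append
  else (c :: st.1, true)

def replaceSharp_alt (orgMusicSoundStr : String) : String :=
  String.mk ((orgMusicSoundStr.toList.foldl replaceSharpStepB ([], false)).1.reverse)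

-- ===== PRECONDITION & SPEC =====
def Spec_replaceSharp (orgMusicSoundStr : String) (out : String) : Prop := out = replaceSharp_alt orgMusicSoundStr
instance (orgMusicSoundStr : String) (out : String) : Decidable (Spec_replaceSharp orgMusicSoundStr out) := by unfold Spec_replaceSharp; infer_instance

-- ===== CLAIM (what is proved, stated in full; the proofs are below) =====
def Claim_equal_replaceSharp : Prop := ∀ (orgMusicSoundStr : String), Dom_replaceSharp orgMusicSoundStr → Spec_replaceSharp orgMusicSoundStr (replaceSharp orgMusicSoundStr)

-- ===== LEMMAS AND PROOFS =====

-- Reference function: greedy left-to-right pairing of each char with a following sharp sign.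
def pairLower : List Char → List Char
  | [] => []
  | [c] => [c]
  | c1 :: c2 :: r => if c2 == '#' then PySem.Chars.lowerChar c1 :: pairLower r else c1 :: pairLower (c2 :: r)

theorem mk_toList (l : List Char) : (String.mk l).toList = l :=
  Eq.symm ((fun {l} {s} => String.ofList_eq.mp) rfl)

theorem loopA_eq (cs : List Char) (i : Nat) (acc : String) :
    (replaceSharpLoopA cs i acc).toList = acc.toList ++ pairLower (cs.drop i) := by
  induction i, acc using replaceSharpLoopA.induct cs with
  | case1 i acc h hc ih =>
    rw [replaceSharpLoopA, dif_pos h, if_pos hc, ih]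
    have hdrop : cs.drop i = cs.getD i ' ' :: cs.drop (i+1) := by
      rw [List.getD_eq_getElem?_getD, List.getElem?_eq_getElem h]
      exact List.drop_eq_getElem_cons h
    cases hd2 : cs.drop (i+1) with
    | nil =>
      rw [hdrop, hd2, String.toList_push]
      simp only [pairLower]
      simp
    | cons c2 r2 =>
      have hlen : i + 1 < cs.length := by
        by_contra hx
        rw [List.drop_eq_nil_of_le (by omega)] at hd2; cases hd2
      have hc2 : cs.getD (i+1) ' ' = c2 := by
        have hd := List.drop_eq_getElem_cons hlen
        rw [hd2] at hd
        rw [List.getD_eq_getElem?_getD, List.getElem?_eq_getElem hlen]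
        simpa using (List.cons.injEq _ _ _ _ ▸ hd : _) |>.1 |>.symm ▸ rfl
      have hne' : (c2 == '#') = false := by
        rcases Bool.or_eq_true_iff.mp hc with hlast | hne
        · exfalso
          have : i = cs.length - 1 := by simpa using hlast
          have : cs.drop (i+1) = [] := List.drop_eq_nil_of_le (by omega)
          rw [hd2] at this; cases this
        · rw [hc2] at hne; simpa using hne
      rw [hdrop, hd2, String.toList_push]
      simp only [pairLower, hne', if_false, Bool.false_eq_true]
      simp
  | case2 i acc h hc ih =>
    have hc' := hc
    simp only [Bool.or_eq_true_iff, not_or, beq_iff_eq, bne_iff_ne, ne_eq, not_not] at hc'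
    have hlen : i + 1 < cs.length := by omega
    have hsharp : cs.getD (i+1) ' ' = '#' := by
      rw [List.getD_eq_getElem?_getD]; exact hc'.2
    rw [replaceSharpLoopA, dif_pos h, if_neg hc, ih]
    have h3 : cs[i+1] = '#' := by
      simpa [List.getD_eq_getElem?_getD, List.getElem?_eq_getElem hlen] using hc'.2
    have hdrop : cs.drop i = cs.getD i ' ' :: '#' :: cs.drop (i+2) := by
      rw [List.drop_eq_getElem_cons h, List.drop_eq_getElem_cons hlen, h3]
      rw [List.getD_eq_getElem?_getD, List.getElem?_eq_getElem h]
      norm_num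
    rw [hdrop, String.toList_push]
    simp only [pairLower, beq_self_eq_true, if_true]
    simp
  | case3 i acc h =>
    rw [replaceSharpLoopA]
    simp only [dif_neg h]
    rw [List.drop_eq_nil_of_le (by omega)]
    simp [pairLower]

theorem foldB_eq (l : List Char) (acc : List Char) :
    (l.foldl replaceSharpStepB (acc, false)).1 = (pairLower l).reverse ++ acc := by
  induction l using pairLower.induct generalizing acc with
  | case1 => simp [pairLower]
  | case2 c =>
    simp [pairLower, List.foldl, replaceSharpStepB]
  | case3 c1 c2 r h2 ih =>
    have hc2 : c2 = '#' := by simpa using h2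
    subst hc2
    simp only [List.foldl]
    rw [show replaceSharpStepB (acc, false) c1 = (c1 :: acc, true) by
          simp [replaceSharpStepB]]
    rw [show replaceSharpStepB (c1 :: acc, true) '#' = (PySem.Chars.lowerChar c1 :: acc, false) by
          simp [replaceSharpStepB]]
    rw [ih]
    simp [pairLower]
  | case4 c1 c2 r h2 ih =>
    -- c2 ≠ '#': first two steps from (acc,false) equal the steps of (c1::acc,false) on c2::r
    have step1 : replaceSharpStepB (acc, false) c1 = (c1 :: acc, true) := by
      simp [replaceSharpStepB]
    have step2 : replaceSharpStepB (c1 :: acc, true) c2 = (c2 :: c1 :: acc, true) := by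
      simp [replaceSharpStepB, h2]
    have step2' : replaceSharpStepB (c1 :: acc, false) c2 = (c2 :: c1 :: acc, true) := by
      simp [replaceSharpStepB, h2]
    have hih := ih (c1 :: acc)
    simp only [List.foldl, step1, step2, step2'] at hih ⊢
    rw [hih]
    simp [pairLower, h2]

-- ===== VERDICT (by name: the statement is the Claim_ definition above) =====
theorem replaceSharp_spec : Claim_equal_replaceSharp := by
  intro s _
  unfold Spec_replaceSharp replaceSharp replaceSharp_alt
  apply String.toList_inj.mp
  rw [loopA_eq, foldB_eq, mk_toList]
  simp
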